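-- pv_equiv track=rewrite | github.com/StarfBerry/poke-scripts | RNG/Euclid.py | lcrng_recover_lower_16bits_ivs_2
-- ===== SOURCE A (Python) =====
-- from math import ceil
--
-- LCRNGR_MUL_2   = 0xDC6C95D9        # 0xEEB9EB65^2 & 0xFFFFFFFF
--
-- LCRNGR_SUB_2   = 0x4D3BB127        # (0xA3561A1^2 - 0xFFFF) & 0xFFFFFFFF
--
-- LCRNGR_BASE_2  = 0xDC6BB96D6A26    # (LCRNGR_MUL_2 + 1) * 0xFFFF
--
-- LCRNGR_PRIME_2 = 0x1F
--
-- LCRNGR_RMAX_2  = 0x1F0000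
--
-- LCRNGR_SKIP2_2 = 0x5D76BE
--
-- def lcrng_recover_lower_16bits_ivs_2(hp, atk, dfs, spa, spd, spe):
--     first = (spe | (spa << 5) | (spd << 10)) << 16
--     second = (hp | (atk << 5) | (dfs << 10)) << 16
--
--     k = 0
--     t = (second - LCRNGR_MUL_2 * first - LCRNGR_SUB_2) & 0x7fffffff
--     x = (t * LCRNGR_PRIME_2) % LCRNGR_MUL_2
--     kmax = (LCRNGR_BASE_2 - t) >> 31
--
--     res = []
--     while k <= kmax: # at most 188 iterations
--         r = (x + LCRNGR_SKIP2_2 * k) % LCRNGR_MUL_2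
--         if r % LCRNGR_PRIME_2 == 0 and r < LCRNGR_RMAX_2:
--             tmp = t + k * 0x80000000
--             low = ((tmp // LCRNGR_MUL_2) * 0x95D9 + 0xB126) & 0xffff # backward of 2 states to get the correct 16bits low for LCRNG
--             s = second | low
--             res.extend((s, s ^ 0x80000000))
--
--         k += ceil((LCRNGR_MUL_2 - r) / LCRNGR_SKIP2_2)
--
--     return res
-- ===== SOURCE B (Python) =====
-- from math import ceil
--
-- LCRNGR_MUL_2   = 0xDC6C95D9
-- LCRNGR_SUB_2   = 0x4D3BB127
-- LCRNGR_BASE_2  = 0xDC6BB96D6A26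
-- LCRNGR_PRIME_2 = 0x1F
-- LCRNGR_RMAX_2  = 0x1F0000
-- LCRNGR_SKIP2_2 = 0x5D76BE
--
-- def lcrng_recover_lower_16bits_ivs_2(hp, atk, dfs, spa, spd, spe):
--     first = (spe | (spa << 5) | (spd << 10)) << 16
--     second = (hp | (atk << 5) | (dfs << 10)) << 16
--
--     t = (second - LCRNGR_MUL_2 * first - LCRNGR_SUB_2) & 0x7fffffff
--     x = (t * LCRNGR_PRIME_2) % LCRNGR_MUL_2
--     kmax = (LCRNGR_BASE_2 - t) >> 31
--
--     res = []
--     for k in range(kmax + 1):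
--         r = (x + LCRNGR_SKIP2_2 * k) % LCRNGR_MUL_2
--         if r % LCRNGR_PRIME_2 == 0 and r < LCRNGR_RMAX_2:
--             tmp = t + k * 0x80000000
--             low = ((tmp // LCRNGR_MUL_2) * 0x95D9 + 0xB126) & 0xffff
--             s = second | low
--             res.append(s)
--             res.append(s ^ 0x80000000)
--     return res
-- ===== Notes on version B (the rewrite author's own statement) =====
-- stated objective: simpler
-- what changed: Replaces the Euclidean skip-stepping while-loop (variable ceil-based jumps of k) with a plain linear for-loop scanning every k in range(kmax+1); correct because SKIP exceeds RMAX so skipped k never hit.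
import Mathlib
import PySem

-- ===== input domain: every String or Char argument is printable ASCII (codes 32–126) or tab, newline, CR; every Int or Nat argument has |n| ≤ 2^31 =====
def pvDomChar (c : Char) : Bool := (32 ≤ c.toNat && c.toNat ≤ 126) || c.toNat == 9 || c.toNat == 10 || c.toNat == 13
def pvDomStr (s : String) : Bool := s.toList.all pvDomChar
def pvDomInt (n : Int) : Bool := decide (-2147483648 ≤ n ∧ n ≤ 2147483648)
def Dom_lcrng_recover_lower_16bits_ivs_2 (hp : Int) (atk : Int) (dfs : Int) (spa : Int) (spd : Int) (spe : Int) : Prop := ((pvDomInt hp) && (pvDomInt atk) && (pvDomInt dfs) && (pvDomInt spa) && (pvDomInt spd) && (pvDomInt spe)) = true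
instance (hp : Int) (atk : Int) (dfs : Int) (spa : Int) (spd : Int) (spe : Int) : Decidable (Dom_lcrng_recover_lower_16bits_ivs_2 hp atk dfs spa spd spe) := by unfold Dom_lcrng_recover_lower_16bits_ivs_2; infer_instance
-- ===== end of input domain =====

-- B replaces A's Euclidean skip loop (variable-size jumps of k) by a plain linear scan of all k
-- in range(kmax+1); same results in the same order, stated for simplicity, not speed.

-- ===== PORT A =====
-- A's while-loop; the step `k += ceil((MUL - r)/SKIP)` uses float division in Python, which is
-- exact here (ported as exact ceiling division -((r - MUL) // SKIP)).
def pvLoopA (second t x kmax : Int) (k : Int) (res : List Int) : List Int :=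
  if _h : k ≤ kmax then
    let r := PySem.Int.mod (x + 6125246 * k) 3698103769
    let res' :=
      if PySem.Int.mod r 31 = 0 ∧ r < 2031616 then
        let tmp := t + k * 2147483648
        let low := PySem.Int.band (PySem.Int.floordiv tmp 3698103769 * 38361 + 45350) 65535
        let s := PySem.Int.bor second low
        res ++ [s, PySem.Int.bxor s 2147483648]
      else res
    pvLoopA second t x kmax (k + -(PySem.Int.floordiv (r - 3698103769) 6125246)) res'
  else res
termination_by (kmax + 1 - k).toNat
decreasing_by
  have hm0 := PySem.Int.mod_nonneg (x + 6125246 * k) (b := 3698103769) (by norm_num)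
  have hm := PySem.Int.mod_lt (x + 6125246 * k) (b := 3698103769) (by norm_num)
  rw [PySem.Int.floordiv_eq_ediv_of_pos (by norm_num)]
  omega

def lcrng_recover_lower_16bits_ivs_2 (hp : Int) (atk : Int) (dfs : Int) (spa : Int) (spd : Int) (spe : Int) : List Int :=
  let first := (PySem.Int.bor (PySem.Int.bor spe (spa <<< 5)) (spd <<< 10)) <<< 16
  let second := (PySem.Int.bor (PySem.Int.bor hp (atk <<< 5)) (dfs <<< 10)) <<< 16
  let t := PySem.Int.band (second - 3698103769 * first - 1295757607) 2147483647
  let x := PySem.Int.mod (t * 31) 3698103769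
  let kmax := (242355230566950 - t) >>> 31
  pvLoopA second t x kmax 0 []

-- ===== PORT B =====
def lcrng_recover_lower_16bits_ivs_2_alt (hp : Int) (atk : Int) (dfs : Int) (spa : Int) (spd : Int) (spe : Int) : List Int :=
  let first := (PySem.Int.bor (PySem.Int.bor spe (spa <<< 5)) (spd <<< 10)) <<< 16
  let second := (PySem.Int.bor (PySem.Int.bor hp (atk <<< 5)) (dfs <<< 10)) <<< 16
  let t := PySem.Int.band (second - 3698103769 * first - 1295757607) 2147483647
  let x := PySem.Int.mod (t * 31) 3698103769
  let kmax := (242355230566950 - t) >>> 31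
  (PySem.List.pyRange 0 (kmax + 1) 1).foldl (fun res k =>
    let r := PySem.Int.mod (x + 6125246 * k) 3698103769
    if PySem.Int.mod r 31 = 0 ∧ r < 2031616 then
      let tmp := t + k * 2147483648
      let low := PySem.Int.band (PySem.Int.floordiv tmp 3698103769 * 38361 + 45350) 65535
      let s := PySem.Int.bor second low
      res ++ [s, PySem.Int.bxor s 2147483648]
    else res) []

-- ===== PRECONDITION & SPEC =====
def Spec_lcrng_recover_lower_16bits_ivs_2 (hp : Int) (atk : Int) (dfs : Int) (spa : Int) (spd : Int) (spe : Int) (out : List Int) : Prop := out = lcrng_recover_lower_16bits_ivs_2_alt hp atk dfs spa spd spe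
instance (hp : Int) (atk : Int) (dfs : Int) (spa : Int) (spd : Int) (spe : Int) (out : List Int) : Decidable (Spec_lcrng_recover_lower_16bits_ivs_2 hp atk dfs spa spd spe out) := by unfold Spec_lcrng_recover_lower_16bits_ivs_2; infer_instance

-- ===== CLAIM (what is proved, stated in full; the proofs are below) =====
def Claim_equal_lcrng_recover_lower_16bits_ivs_2 : Prop := ∀ (hp : Int) (atk : Int) (dfs : Int) (spa : Int) (spd : Int) (spe : Int), Dom_lcrng_recover_lower_16bits_ivs_2 hp atk dfs spa spd spe → Spec_lcrng_recover_lower_16bits_ivs_2 hp atk dfs spa spd spe (lcrng_recover_lower_16bits_ivs_2 hp atk dfs spa spd spe)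

-- ===== LEMMAS AND PROOFS =====

-- the contribution of one k to the result list
def pvHit (second t x k : Int) : List Int :=
  if PySem.Int.mod (PySem.Int.mod (x + 6125246 * k) 3698103769) 31 = 0 ∧
     PySem.Int.mod (x + 6125246 * k) 3698103769 < 2031616 then
    [PySem.Int.bor second (PySem.Int.band (PySem.Int.floordiv (t + k * 2147483648) 3698103769 * 38361 + 45350) 65535),
     PySem.Int.bxor (PySem.Int.bor second (PySem.Int.band (PySem.Int.floordiv (t + k * 2147483648) 3698103769 * 38361 + 45350) 65535)) 2147483648]
  else []

lemma pyRange_one_nil (a c : Int) (h : c ≤ a) : PySem.List.pyRange a c 1 = [] := by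
  rw [PySem.List.pyRange_one]
  have h0 : (c - a).toNat = 0 := by omega
  rw [h0]; simp

-- every k strictly between a hit candidate and the next skip target contributes nothing:
-- r grows by SKIP = 6125246 > RMAX = 2031616 without wrapping past MUL
lemma pvHit_skip (second t x k j : Int) (h1 : 1 ≤ j)
    (h2 : j < -(PySem.Int.floordiv (PySem.Int.mod (x + 6125246 * k) 3698103769 - 3698103769) 6125246)) :
    pvHit second t x (k + j) = [] := by
  rw [PySem.Int.floordiv_eq_ediv_of_pos (by norm_num),
      PySem.Int.mod_eq_emod_of_pos (by norm_num)] at h2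
  unfold pvHit
  rw [if_neg]
  rw [PySem.Int.mod_eq_emod_of_pos (a := x + 6125246 * (k + j)) (by norm_num : (0:Int) < 3698103769)]
  have hsplit := Int.mul_ediv_add_emod (x + 6125246 * k) 3698103769
  have hm0 : (0:Int) ≤ (x + 6125246 * k) % 3698103769 := Int.emod_nonneg _ (by norm_num)
  have hmlt : (x + 6125246 * k) % 3698103769 < 3698103769 := Int.emod_lt_of_pos _ (by norm_num)
  have hjs : 6125246 * 1 ≤ 6125246 * j := by
    exact mul_le_mul_of_nonneg_left h1 (by norm_num)
  have hjd : 6125246 * j ≤ 6125246 * (-(((x + 6125246 * k) % 3698103769 - 3698103769) / 6125246) - 1) := by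
    exact mul_le_mul_of_nonneg_left (by omega) (by norm_num)
  have hub : (x + 6125246 * k) % 3698103769 + 6125246 * j < 3698103769 := by omega
  have hmodeq : (x + 6125246 * (k + j)) % 3698103769
      = (x + 6125246 * k) % 3698103769 + 6125246 * j := by omega
  intro hc
  rcases hc with ⟨_, hlt⟩
  omega

lemma flatMap_pyRange_drop (f : Int → List Int) (c : Int) :
    ∀ (n : Nat) (a b : Int), (b - a).toNat ≤ n → a ≤ b → (∀ j, a ≤ j → j < b → f j = []) →
    (PySem.List.pyRange a c 1).flatMap f = (PySem.List.pyRange b c 1).flatMap f := by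
  intro n
  induction n with
  | zero =>
    intro a b hn hab _
    have : a = b := by omega
    rw [this]
  | succ n ih =>
    intro a b hn hab hj
    by_cases hab' : a = b
    · rw [hab']
    · have halt : a < b := lt_of_le_of_ne hab hab'
      by_cases hac : a < c
      · rw [PySem.List.pyRange_one_cons (by omega)]
        simp only [List.flatMap_cons, hj a le_rfl halt, List.nil_append]
        exact ih (a + 1) b (by omega) (by omega) (fun j hj1 hj2 => hj j (by omega) hj2)
      · rw [pyRange_one_nil a c (by omega), pyRange_one_nil b c (by omega)]

lemma loopA_eq (second t x kmax : Int) :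
    ∀ (n : Nat) (k : Int) (res : List Int), (kmax + 1 - k).toNat ≤ n →
    pvLoopA second t x kmax k res = res ++ (PySem.List.pyRange k (kmax + 1) 1).flatMap (pvHit second t x) := by
  intro n
  induction n with
  | zero =>
    intro k res hn
    rw [pvLoopA, dif_neg (by omega), pyRange_one_nil k (kmax + 1) (by omega)]
    simp
  | succ n ih =>
    intro k res hn
    by_cases hk : k ≤ kmax
    · rw [pvLoopA, dif_pos hk]
      have hm0 := PySem.Int.mod_nonneg (x + 6125246 * k) (b := 3698103769) (by norm_num)
      have hm := PySem.Int.mod_lt (x + 6125246 * k) (b := 3698103769) (by norm_num)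
      have hd1 : 1 ≤ -(PySem.Int.floordiv (PySem.Int.mod (x + 6125246 * k) 3698103769 - 3698103769) 6125246) := by
        rw [PySem.Int.floordiv_eq_ediv_of_pos (by norm_num)]
        omega
      rw [ih _ _ (by
        rw [PySem.Int.floordiv_eq_ediv_of_pos (by norm_num)] at hd1 ⊢
        omega)]
      rw [PySem.List.pyRange_one_cons (by omega : k < kmax + 1)]
      simp only [List.flatMap_cons]
      rw [flatMap_pyRange_drop (pvHit second t x) (kmax + 1)
        ((k + -(PySem.Int.floordiv (PySem.Int.mod (x + 6125246 * k) 3698103769 - 3698103769) 6125246)) - (k + 1)).toNat (k + 1)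
        (k + -(PySem.Int.floordiv (PySem.Int.mod (x + 6125246 * k) 3698103769 - 3698103769) 6125246))
        le_rfl
        (by rw [PySem.Int.floordiv_eq_ediv_of_pos (by norm_num)] at hd1 ⊢; omega)
        (fun j hj1 hj2 => by
          have hs := pvHit_skip second t x k (j - k) (by omega) (by omega)
          have e : k + (j - k) = j := by ring
          rw [e] at hs
          exact hs)]
      unfold pvHit
      split
      · simp
      · simp
    · rw [pvLoopA, dif_neg hk, pyRange_one_nil k (kmax + 1) (by omega)]
      simp

lemma foldl_body_eq (second t x : Int) (l : List Int) :
    ∀ init : List Int,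
    l.foldl (fun res k =>
      let r := PySem.Int.mod (x + 6125246 * k) 3698103769
      if PySem.Int.mod r 31 = 0 ∧ r < 2031616 then
        let tmp := t + k * 2147483648
        let low := PySem.Int.band (PySem.Int.floordiv tmp 3698103769 * 38361 + 45350) 65535
        let s := PySem.Int.bor second low
        res ++ [s, PySem.Int.bxor s 2147483648]
      else res) init = init ++ l.flatMap (pvHit second t x) := by
  induction l with
  | nil => intro init; simp
  | cons a l ih =>
    intro init
    simp only [List.foldl_cons, List.flatMap_cons]
    rw [ih]
    unfold pvHit
    split
    · simp
    · simp

lemma ports_eq (second t x kmax : Int) :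
    pvLoopA second t x kmax 0 [] =
    (PySem.List.pyRange 0 (kmax + 1) 1).foldl (fun res k =>
      let r := PySem.Int.mod (x + 6125246 * k) 3698103769
      if PySem.Int.mod r 31 = 0 ∧ r < 2031616 then
        let tmp := t + k * 2147483648
        let low := PySem.Int.band (PySem.Int.floordiv tmp 3698103769 * 38361 + 45350) 65535
        let s := PySem.Int.bor second low
        res ++ [s, PySem.Int.bxor s 2147483648]
      else res) [] := by
  rw [loopA_eq second t x kmax (kmax + 1 - 0).toNat 0 [] le_rfl, foldl_body_eq]

-- ===== VERDICT (by name: the statement is the Claim_ definition above) =====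
theorem lcrng_recover_lower_16bits_ivs_2_spec : Claim_equal_lcrng_recover_lower_16bits_ivs_2 := by
  intro hp atk dfs spa spd spe _
  unfold Spec_lcrng_recover_lower_16bits_ivs_2 lcrng_recover_lower_16bits_ivs_2 lcrng_recover_lower_16bits_ivs_2_alt
  exact ports_eq _ _ _ _
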